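-- pv_equiv track=rewrite | github.com/jlga94/tesis | TFIDF.py | getDictionaryDistributionInDocuments
-- ===== SOURCE A (Python) =====
-- def getDictionaryDistributionInDocuments(dataset):
-- 	dictionaryDistribution = {}
-- 	for document in dataset:
-- 		wordsInDocument=[]
-- 		for word in document:
-- 			if word in dictionaryDistribution.keys() and not (word in wordsInDocument): #Para no contar doble
-- 				dictionaryDistribution[word]+=1
-- 			else:
-- 				dictionaryDistribution[word]=1
-- 				wordsInDocument.append(word)
--
-- 	return dictionaryDistribution
-- ===== SOURCE B (Python) =====
-- def getDictionaryDistributionInDocuments(dataset):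
--     result = {}
--     known = set()
--     for document in dataset:
--         for word in document:
--             if word in known:
--                 result[word] += 1
--             else:
--                 result[word] = 1
--         known.update(document)
--     return result
-- ===== Notes on version B (the rewrite author's own statement) =====
-- stated objective: faster
-- what changed: Replaces A's per-document 'wordsInDocument' list (a linear membership scan per word occurrence, plus a dict-keys membership test) by a single cross-document set of words seen in earlier documents: one O(1) set test per occurrence, set updated once per document.
import Mathlib
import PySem

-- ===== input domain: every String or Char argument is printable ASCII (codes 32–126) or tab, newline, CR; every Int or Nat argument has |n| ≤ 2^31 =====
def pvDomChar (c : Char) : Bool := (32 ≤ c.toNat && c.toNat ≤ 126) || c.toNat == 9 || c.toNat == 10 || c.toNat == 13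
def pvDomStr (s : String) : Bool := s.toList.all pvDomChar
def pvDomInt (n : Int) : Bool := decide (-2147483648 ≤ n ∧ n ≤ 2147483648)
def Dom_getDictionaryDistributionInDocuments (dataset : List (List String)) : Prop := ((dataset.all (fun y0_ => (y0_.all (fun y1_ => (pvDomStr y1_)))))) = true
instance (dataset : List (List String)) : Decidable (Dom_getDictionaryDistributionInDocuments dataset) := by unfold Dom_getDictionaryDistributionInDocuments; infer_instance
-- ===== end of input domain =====

-- B tracks one cross-document set of words seen in earlier documents instead of A's
-- per-document "already counted" list scanned per occurrence; same values, different state.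

-- ===== PORT A =====
-- inner loop body: state is (dictionaryDistribution, wordsInDocument)
def pvAStep (st : PySem.Dict String Int × List String) (word : String) :
    PySem.Dict String Int × List String :=
  if st.1.contains word && !(st.2.contains word) then
    (st.1.insert word (st.1.getD word 0 + 1), st.2)
  else
    (st.1.insert word 1, st.2 ++ [word])

-- one document of A's outer loop (wordsInDocument starts empty)
def pvADoc (dd : PySem.Dict String Int) (document : List String) : PySem.Dict String Int :=
  (document.foldl pvAStep (dd, ([] : List String))).1

def getDictionaryDistributionInDocuments (dataset : List (List String)) : List (String × Int) :=
  (dataset.foldl pvADoc PySem.Dict.empty).items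

-- ===== PORT B =====
-- inner loop body: 'if word in known: result[word] += 1 else: result[word] = 1'
def pvBStep (known : PySem.Set String) (r : PySem.Dict String Int) (word : String) :
    PySem.Dict String Int :=
  if PySem.Set.contains known word then r.insert word (r.getD word 0 + 1)
  else r.insert word 1

-- one document of B's outer loop; then 'known.update(document)'
def pvBDoc (st : PySem.Dict String Int × PySem.Set String) (document : List String) :
    PySem.Dict String Int × PySem.Set String :=
  (document.foldl (pvBStep st.2) st.1, PySem.Set.update st.2 document)

def getDictionaryDistributionInDocuments_alt (dataset : List (List String)) : List (String × Int) :=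
  (dataset.foldl pvBDoc (PySem.Dict.empty, PySem.Set.empty)).1.items

-- ===== PRECONDITION & SPEC =====
def Spec_getDictionaryDistributionInDocuments (dataset : List (List String)) (out : List (String × Int)) : Prop := out = getDictionaryDistributionInDocuments_alt dataset
instance (dataset : List (List String)) (out : List (String × Int)) : Decidable (Spec_getDictionaryDistributionInDocuments dataset out) := by unfold Spec_getDictionaryDistributionInDocuments; infer_instance

-- ===== CLAIM (what is proved, stated in full; the proofs are below) =====
def Claim_equal_getDictionaryDistributionInDocuments : Prop := ∀ (dataset : List (List String)), Dom_getDictionaryDistributionInDocuments dataset → Spec_getDictionaryDistributionInDocuments dataset (getDictionaryDistributionInDocuments dataset)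

-- ===== LEMMAS AND PROOFS =====

-- A's per-word step with the seen-list eliminated: the branch condition reads the dict d0
-- the document started from, not the evolving state
def pvStepC (d0 d : PySem.Dict String Int) (w : String) : PySem.Dict String Int :=
  d.insert w (if d0.contains w then d.getD w 0 + 1 else 1)

-- A's inner loop equals the seen-free fold pvStepC
theorem pvA_elim_seen (doc : List String) :
    ∀ (d0 d : PySem.Dict String Int) (seen : List String),
    (∀ w, d.contains w = (d0.contains w || seen.contains w)) →
    (∀ w, seen.contains w = true → d0.contains w = false) →
    (doc.foldl pvAStep (d, seen)).1 = doc.foldl (pvStepC d0) d := by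
  induction doc with
  | nil => intro d0 d seen _ _; rfl
  | cons w rest ih =>
    intro d0 d seen hk hs
    simp only [List.foldl_cons]
    by_cases hw0 : d0.contains w = true
    · have hsw : seen.contains w = false := by
        by_cases h : seen.contains w = true
        · exact absurd (hs w h) (by simp [hw0])
        · simpa using h
      have hdw : d.contains w = true := by rw [hk]; simp [hw0]
      have hnm : w ∉ seen := by simpa using hsw
      have : pvAStep (d, seen) w = (d.insert w (d.getD w 0 + 1), seen) := by
        simp [pvAStep, hdw, hnm]
      rw [this]
      have hstep : pvStepC d0 d w = d.insert w (d.getD w 0 + 1) := by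
        simp [pvStepC, hw0]
      rw [hstep]
      apply ih
      · intro w'
        by_cases h : w' = w
        · subst h; simp [PySem.Dict.contains_insert, hw0]
        · simp [PySem.Dict.contains_insert, h, hk w']
      · exact hs
    · have hw0' : d0.contains w = false := by simpa using hw0
      have : pvAStep (d, seen) w = (d.insert w 1, seen ++ [w]) := by
        by_cases hsw : seen.contains w = true
        · have hm : w ∈ seen := by simpa using hsw
          simp [pvAStep, hm]
        · have hdw : d.contains w = false := by
            rw [hk]; simp [hw0', by simpa using hsw]
          simp [pvAStep, hdw]
      rw [this]
      have hstep : pvStepC d0 d w = d.insert w 1 := by simp [pvStepC, hw0']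
      rw [hstep]
      apply ih
      · intro w'
        by_cases h : w' = w
        · subst h
          simp [PySem.Dict.contains_insert, List.contains_append]
        · simp [PySem.Dict.contains_insert, h, hk w', List.contains_append,
            List.contains_cons, Ne.symm h]
      · intro w' hw'
        simp only [List.contains_append, List.contains_cons, Bool.or_eq_true] at hw'
        rcases hw' with h | h
        · exact hs w' h
        · have : w' = w := by simpa using h
          subst this; exact hw0'

-- A's document pass in the seen-free form
theorem pvADoc_eq_foldl (d0 : PySem.Dict String Int) (doc : List String) :
    pvADoc d0 doc = doc.foldl (pvStepC d0) d0 := by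
  apply pvA_elim_seen
  · intro w; simp
  · intro w h; simp at h

-- B's per-word step equals pvStepC when 'known' has exactly d0's keys
theorem pvBStep_eq_pvStepC (known : PySem.Set String) (d0 : PySem.Dict String Int)
    (h : ∀ w, PySem.Set.contains known w = d0.contains w) :
    pvBStep known = pvStepC d0 := by
  funext d w
  rw [pvBStep, pvStepC, h w]
  by_cases hc : d0.contains w = true <;> simp [hc]

-- membership in the dict after a document pass
theorem pvStepC_fold_contains (d0 : PySem.Dict String Int) (doc : List String) :
    ∀ (d : PySem.Dict String Int) (w : String),
    (doc.foldl (pvStepC d0) d).contains w = (d.contains w || doc.contains w) := by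
  induction doc with
  | nil => intro d w; simp
  | cons x rest ih =>
    intro d w
    simp only [List.foldl_cons]
    rw [ih]
    by_cases h : w = x
    · subst h; simp [pvStepC, PySem.Dict.contains_insert]
    · have hbx : (w == x) = false := by simpa using h
      simp [pvStepC, PySem.Dict.contains_insert, hbx, h]

-- the outer fold: B's state tracks A's dict, with known ≡ the dict's key set
theorem pvMain (ds : List (List String)) :
    ∀ (d : PySem.Dict String Int) (known : PySem.Set String),
    (∀ w, PySem.Set.contains known w = d.contains w) →
    (ds.foldl pvBDoc (d, known)).1 = ds.foldl pvADoc d := by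
  induction ds with
  | nil => intro d known _; rfl
  | cons doc rest ih =>
    intro d known hinv
    simp only [List.foldl_cons]
    have hdoc : pvBDoc (d, known) doc = (doc.foldl (pvStepC d) d, PySem.Set.update known doc) := by
      rw [pvBDoc, pvBStep_eq_pvStepC known d hinv]
    rw [hdoc, pvADoc_eq_foldl d doc]
    apply ih
    intro w
    rw [pvStepC_fold_contains, ← hinv w]
    have hu : PySem.Set.contains (PySem.Set.update known doc) w
        = (PySem.Set.contains known w || doc.contains w) := by
      by_cases h1 : w ∈ known <;> by_cases h2 : w ∈ doc <;>
        simp [PySem.Set.contains_eq_listContains, PySem.Set.mem_update, h1, h2]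
    rw [hu]

-- ===== VERDICT (by name: the statement is the Claim_ definition above) =====
theorem getDictionaryDistributionInDocuments_spec : Claim_equal_getDictionaryDistributionInDocuments := by
  intro dataset _
  unfold Spec_getDictionaryDistributionInDocuments getDictionaryDistributionInDocuments
    getDictionaryDistributionInDocuments_alt
  rw [pvMain dataset PySem.Dict.empty PySem.Set.empty (by intro w; simp [PySem.Set.empty, PySem.Set.contains_eq_listContains])]
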